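-- pv_equiv track=rewrite | github.com/teremterem/MiniAgents | examples/DELETEME/md_chat_history.py | grab_and_clean_up_lines
-- ===== SOURCE A (Python) =====
-- from typing import Optional
--
-- def grab_and_clean_up_lines(md_lines: list[str], start_line: int, end_line: Optional[int] = None) -> str:
--     """
--     Grab a snippet of the markdown content by start and end line numbers and clean it up (remove leading and
--     trailing empty lines).
--     """
--     if end_line is None:
--         end_line = len(md_lines)
--
--     content_lines = md_lines[start_line:end_line]
--
--     # remove leading and trailing empty lines (but keep the leading and trailing whitespaces of the non-empty lines)
--     while content_lines and not content_lines[0].strip():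
--         content_lines.pop(0)
--     while content_lines and not content_lines[-1].strip():
--         content_lines.pop()
--
--     if not content_lines:
--         # there is no content in this section
--         return ""
--
--     return "\n".join(content_lines)
-- ===== SOURCE B (Python) =====
-- from typing import Optional
--
--
-- def grab_and_clean_up_lines(md_lines: list[str], start_line: int, end_line: Optional[int] = None) -> str:
--     # Two-pointer scan: find the first and last non-blank line indices, then one slice + join.
--     lines = md_lines[start_line:(len(md_lines) if end_line is None else end_line)]
--     i = 0
--     while i < len(lines) and not lines[i].strip():
--         i += 1
--     j = len(lines)
--     while j > i and not lines[j - 1].strip():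
--         j -= 1
--     return "\n".join(lines[i:j])
-- ===== Notes on version B (the rewrite author's own statement) =====
-- stated objective: alternative
-- what changed: Replaces A's destructive pop(0)/pop() while-loops on the sliced list (pop(0) is O(n) each) by a two-pointer index scan for the first and last non-blank line followed by a single slice and join.
import Mathlib
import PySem

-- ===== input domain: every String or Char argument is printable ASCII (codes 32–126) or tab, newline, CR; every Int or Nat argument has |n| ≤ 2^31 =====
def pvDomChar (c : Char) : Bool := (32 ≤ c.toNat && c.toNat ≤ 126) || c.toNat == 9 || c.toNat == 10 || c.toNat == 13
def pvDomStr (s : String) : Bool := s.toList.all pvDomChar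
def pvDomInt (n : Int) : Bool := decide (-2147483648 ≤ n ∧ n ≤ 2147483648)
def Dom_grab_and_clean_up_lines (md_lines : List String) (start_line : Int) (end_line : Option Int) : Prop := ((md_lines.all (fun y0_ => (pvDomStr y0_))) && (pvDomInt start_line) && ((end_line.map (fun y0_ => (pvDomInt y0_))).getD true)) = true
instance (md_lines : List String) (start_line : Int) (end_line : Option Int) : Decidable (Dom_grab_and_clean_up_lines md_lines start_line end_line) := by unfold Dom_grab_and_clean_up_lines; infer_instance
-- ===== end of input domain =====

-- B replaces A's repeated pop(0)/pop() on the sliced list by a two-pointer index scan and a single slice (alternative decomposition).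
-- ===== PORT A =====
def pvBlank (s : String) : Bool := PySem.Str.strip s == ""

-- while content_lines and not content_lines[0].strip(): content_lines.pop(0)
def pvAFront : List String → List String
  | [] => []
  | x :: xs => if pvBlank x then pvAFront xs else x :: xs

-- while content_lines and not content_lines[-1].strip(): content_lines.pop()
def pvABack (xs : List String) : List String :=
  if h : xs = [] then xs
  else if pvBlank (xs.getLast h) then pvABack xs.dropLast else xs
  termination_by xs.length
  decreasing_by
    simp [List.length_dropLast]
    exact List.length_pos_iff.mpr h

def grab_and_clean_up_lines (md_lines : List String) (start_line : Int) (end_line : Option Int) : String :=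
  let e : Int := match end_line with
    | none => (md_lines.length : Int)
    | some v => v
  let content := PySem.List.slice md_lines (some start_line) (some e)
  let content := pvABack (pvAFront content)
  if content = [] then "" else PySem.Str.join "\n" content

-- ===== PORT B =====
-- while i < len(lines) and not lines[i].strip(): i += 1
def pvAltI (lines : List String) (i : Nat) : Nat :=
  if h : i < lines.length then
    if pvBlank lines[i] then pvAltI lines (i + 1) else i
  else i
  termination_by lines.length - i

-- while j > i and not lines[j - 1].strip(): j -= 1
-- (lines[j - 1] is always in range at the call site: i ≤ j - 1 < lines.length, so getD is exact)
def pvAltJ (lines : List String) (i j : Nat) : Nat :=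
  if _h : i < j then
    if pvBlank (lines.getD (j - 1) "") then pvAltJ lines i (j - 1) else j
  else j
  termination_by j

def grab_and_clean_up_lines_alt (md_lines : List String) (start_line : Int) (end_line : Option Int) : String :=
  let e : Int := match end_line with
    | none => (md_lines.length : Int)
    | some v => v
  let lines := PySem.List.slice md_lines (some start_line) (some e)
  let i := pvAltI lines 0
  let j := pvAltJ lines i lines.length
  PySem.Str.join "\n" (PySem.List.slice lines (some (i : Int)) (some (j : Int)))

-- ===== PRECONDITION & SPEC =====
def Spec_grab_and_clean_up_lines (md_lines : List String) (start_line : Int) (end_line : Option Int) (out : String) : Prop := out = grab_and_clean_up_lines_alt md_lines start_line end_line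
instance (md_lines : List String) (start_line : Int) (end_line : Option Int) (out : String) : Decidable (Spec_grab_and_clean_up_lines md_lines start_line end_line out) := by unfold Spec_grab_and_clean_up_lines; infer_instance

-- ===== CLAIM (what is proved, stated in full; the proofs are below) =====
def Claim_equal_grab_and_clean_up_lines : Prop := ∀ (md_lines : List String) (start_line : Int) (end_line : Option Int), Dom_grab_and_clean_up_lines md_lines start_line end_line → Spec_grab_and_clean_up_lines md_lines start_line end_line (grab_and_clean_up_lines md_lines start_line end_line)

-- ===== LEMMAS AND PROOFS =====

theorem pvAFront_eq (L : List String) : pvAFront L = L.dropWhile pvBlank := by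
  induction L with
  | nil => rfl
  | cons x xs ih => by_cases h : pvBlank x <;> simp [pvAFront, List.dropWhile, h, ih]

theorem pvABack_reverse (L : List String) :
    pvABack L.reverse = (L.dropWhile pvBlank).reverse := by
  induction L with
  | nil => rw [pvABack]; rfl
  | cons x xs ih =>
    rw [List.reverse_cons, pvABack]
    have hne : xs.reverse ++ [x] ≠ [] := by simp
    have hlast : (xs.reverse ++ [x]).getLast hne = x := by
      simp
    simp only [dif_neg hne, hlast]
    by_cases h : pvBlank x
    · simp [h, List.dropWhile, ih]
    · simp [h, List.dropWhile]

theorem pvABack_eq (L : List String) : pvABack L = List.rdropWhile pvBlank L := by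
  have := pvABack_reverse L.reverse
  simpa [List.rdropWhile] using this

theorem pvAltI_eq (L : List String) (i : Nat) :
    pvAltI L i = i + ((L.drop i).takeWhile pvBlank).length := by
  by_cases h : i < L.length
  · have hd : L.drop i = L[i] :: L.drop (i + 1) := List.drop_eq_getElem_cons h
    by_cases hb : pvBlank L[i]
    · rw [pvAltI]
      have ih := pvAltI_eq L (i + 1)
      rw [dif_pos h, if_pos hb, ih, hd, List.takeWhile_cons, if_pos hb, List.length_cons]
      omega
    · rw [pvAltI]
      rw [dif_pos h, if_neg hb, hd, List.takeWhile_cons, if_neg hb, List.length_nil]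
      omega
  · have hnil : L.drop i = [] := List.drop_eq_nil_of_le (by omega)
    rw [pvAltI]
    simp [h, hnil]
  termination_by L.length - i

theorem pvAltJ_eq (L : List String) (i j : Nat) (hij : i ≤ j) (hj : j ≤ L.length) :
    pvAltJ L i j = i + (List.rdropWhile pvBlank ((L.take j).drop i)).length := by
  by_cases h : i < j
  · obtain ⟨k, rfl⟩ : ∃ k, j = k + 1 := ⟨j - 1, by omega⟩
    have hk1 : k + 1 - 1 = k := rfl
    have hk : k < L.length := by omega
    have htake : L.take (k + 1) = L.take k ++ [L[k]] := by
      rw [List.take_add_one]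
      simp [List.getElem?_eq_getElem hk]
    have hlen : (L.take k).length = k := by
      simp [List.length_take]; omega
    have hdrop : (L.take (k + 1)).drop i = (L.take k).drop i ++ [L[k]] := by
      rw [htake, List.drop_append_of_le_length (by omega)]
    have hget : L.getD k "" = L[k] := by
      simp [List.getD, List.getElem?_eq_getElem hk]
    by_cases hb : pvBlank L[k]
    · rw [pvAltJ]
      have ih := pvAltJ_eq L i k (by omega) (by omega)
      simp only [dif_pos h, hk1, hget, hb, if_true, ih, hdrop]
      rw [List.rdropWhile_concat_pos _ _ _ hb]
    · rw [pvAltJ]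
      simp only [dif_pos h, hk1, hget, hb, if_false, Bool.false_eq_true, hdrop]
      rw [List.rdropWhile_concat_neg _ _ _ (by simp [hb])]
      have hlen2 : ((L.take k).drop i).length = k - i := by
        simp [List.length_drop, hlen]
      simp [hlen2]
      omega
  · have hji : j = i := by omega
    rw [pvAltJ]
    simp [hji]
  termination_by j

theorem pv_trim_eq (L : List String) :
    PySem.List.slice L (some ((pvAltI L 0 : Nat) : Int))
        (some ((pvAltJ L (pvAltI L 0) L.length : Nat) : Int))
      = List.rdropWhile pvBlank (L.dropWhile pvBlank) := by
  have hi : pvAltI L 0 = (L.takeWhile pvBlank).length := by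
    simpa using pvAltI_eq L 0
  have hile : (L.takeWhile pvBlank).length ≤ L.length := by
    have h2 : ((L.takeWhile pvBlank) ++ (L.dropWhile pvBlank)).length = L.length := by
      rw [List.takeWhile_append_dropWhile]
    rw [List.length_append] at h2
    omega
  have hdropi : L.drop (L.takeWhile pvBlank).length = L.dropWhile pvBlank := by
    calc L.drop (L.takeWhile pvBlank).length
        = (L.takeWhile pvBlank ++ L.dropWhile pvBlank).drop (L.takeWhile pvBlank).length := by
          rw [List.takeWhile_append_dropWhile]
      _ = L.dropWhile pvBlank := List.drop_left
  have hj := pvAltJ_eq L (pvAltI L 0) L.length (by rw [hi]; exact hile) (le_refl _)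
  rw [PySem.List.slice_natCast, hj]
  simp only [List.take_length, hi, hdropi]
  have hpre : List.rdropWhile pvBlank (L.dropWhile pvBlank) <+: L.dropWhile pvBlank :=
    List.rdropWhile_prefix _ _
  have htk := List.prefix_iff_eq_take.mp hpre
  rw [Nat.add_sub_cancel_left, ← htk]

theorem pv_join_empty : PySem.Str.join "\n" [] = "" := by decide

theorem pv_key (L : List String) :
    (if pvABack (pvAFront L) = [] then "" else PySem.Str.join "\n" (pvABack (pvAFront L)))
      = PySem.Str.join "\n" (PySem.List.slice L (some ((pvAltI L 0 : Nat) : Int))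
          (some ((pvAltJ L (pvAltI L 0) L.length : Nat) : Int))) := by
  rw [pvAFront_eq, pvABack_eq, pv_trim_eq]
  by_cases h : List.rdropWhile pvBlank (L.dropWhile pvBlank) = []
  · rw [if_pos h, h, pv_join_empty]
  · rw [if_neg h]

-- ===== VERDICT (by name: the statement is the Claim_ definition above) =====
theorem grab_and_clean_up_lines_spec : Claim_equal_grab_and_clean_up_lines := by
  intro md_lines start_line end_line _hdom
  show grab_and_clean_up_lines md_lines start_line end_line
      = grab_and_clean_up_lines_alt md_lines start_line end_line
  simp only [grab_and_clean_up_lines, grab_and_clean_up_lines_alt]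
  exact pv_key _
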